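-- pv_equiv track=rewrite | github.com/diegonf84/reportes_revista | export_parquet/export_otros_conceptos_parquet.py | generate_period_list
-- ===== SOURCE A (Python) =====
-- def generate_period_list(max_period: int) -> list:
--     """Generate list of periods for 5 complete years"""
--     max_year = int(str(max_period)[:4])
--     start_year = max_year - 5
--
--     periods = []
--     for year in range(start_year, max_year + 1):
--         for quarter in [1, 2, 3, 4]:
--             period = int(f"{year}{quarter:02d}")
--             if period >= int(f"{start_year}02") and period <= max_period:
--                 periods.append(period)
--
--     return periods
-- ===== SOURCE B (Python) =====
-- def generate_period_list(max_period: int) -> list: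
--     """Generate list of periods for 5 complete years"""
--     max_year = int(str(max_period)[:4])
--     start_year = max_year - 5
--     floor = int(f"{start_year}02")
--
--     def build(j):
--         # periods for the flat quarter indices 0..j (ascending), j counted down
--         if j < 0:
--             return []
--         year, quarter = start_year + j // 4, j % 4 + 1
--         period = int(f"{year}{quarter:02d}")
--         rest = build(j - 1)
--         return rest + [period] if floor <= period <= max_period else rest
--
--     return build(23)
-- ===== Notes on version B (the rewrite author's own statement) =====
-- stated objective: alternative
-- what changed: Replaces the nested ascending year-by-quarter loops with a single descending recursion over one flat quarter index (year and quarter recovered by divmod), assembling the result list tail-first instead of appending in a loop.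
import Mathlib
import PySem

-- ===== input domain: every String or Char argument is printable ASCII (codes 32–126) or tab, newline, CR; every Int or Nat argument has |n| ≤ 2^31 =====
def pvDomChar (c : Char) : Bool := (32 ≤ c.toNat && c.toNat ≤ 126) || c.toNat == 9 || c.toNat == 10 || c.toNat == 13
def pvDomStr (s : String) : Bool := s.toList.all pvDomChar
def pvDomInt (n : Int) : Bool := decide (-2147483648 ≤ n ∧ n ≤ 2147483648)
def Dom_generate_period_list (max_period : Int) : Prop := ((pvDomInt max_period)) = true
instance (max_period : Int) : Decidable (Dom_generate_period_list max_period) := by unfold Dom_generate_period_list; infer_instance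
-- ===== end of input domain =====

-- B replaces A's nested ascending year×quarter loops by one descending recursion over a flat
-- quarter index (year/quarter recovered by divmod), assembling the list tail-first (same value).

-- ===== PORT A =====
-- f"{q:02d}": zero-pad to total width 2 (exact: Python pads the whole rendering, sign included, so only 0..9 gain a '0')
def pyFmt02 (q : Int) : String :=
  if 0 ≤ q ∧ q ≤ 9 then "0" ++ PySem.Int.toStr q else PySem.Int.toStr q

-- int(s); every string built by these ports is a valid integer literal, so the default is unreachable
def pyInt! (s : String) : Int := (PySem.Int.ofStr? s).getD 0

def generate_period_list (max_period : Int) : List Int :=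
  let max_year := pyInt! (PySem.Str.slice (PySem.Int.toStr max_period) none (some 4))
  let start_year := max_year - 5
  (PySem.List.pyRange start_year (max_year + 1) 1).foldl (fun periods year =>
    ([1, 2, 3, 4] : List Int).foldl (fun periods quarter =>
      let period := pyInt! (PySem.Int.toStr year ++ pyFmt02 quarter)
      if pyInt! (PySem.Int.toStr start_year ++ "02") ≤ period ∧ period ≤ max_period then
        periods ++ [period]
      else periods) periods) []

-- ===== PORT B =====
-- B's inner recursion 'build(j)': flat quarter index j counted down, list assembled tail-first
def pvBuild (max_period floor start_year : Int) (j : Int) : List Int :=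
  if _h : j < 0 then []
  else
    let year := start_year + PySem.Int.floordiv j 4
    let quarter := PySem.Int.mod j 4 + 1
    let period := pyInt! (PySem.Int.toStr year ++ pyFmt02 quarter)
    let rest := pvBuild max_period floor start_year (j - 1)
    if floor ≤ period ∧ period ≤ max_period then rest ++ [period] else rest
termination_by (j + 1).toNat
decreasing_by omega

def generate_period_list_alt (max_period : Int) : List Int :=
  let max_year := pyInt! (PySem.Str.slice (PySem.Int.toStr max_period) none (some 4))
  let start_year := max_year - 5
  let floor := pyInt! (PySem.Int.toStr start_year ++ "02")
  pvBuild max_period floor start_year 23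

-- ===== PRECONDITION & SPEC =====
def Spec_generate_period_list (max_period : Int) (out : List Int) : Prop := out = generate_period_list_alt max_period
instance (max_period : Int) (out : List Int) : Decidable (Spec_generate_period_list max_period out) := by unfold Spec_generate_period_list; infer_instance

-- ===== CLAIM (what is proved, stated in full; the proofs are below) =====
def Claim_equal_generate_period_list : Prop := ∀ (max_period : Int), Dom_generate_period_list max_period → Spec_generate_period_list max_period (generate_period_list max_period)

-- ===== LEMMAS AND PROOFS =====

-- the code built at flat index j, and the bound test, shared by both closed forms
def pvCode (start_year j : Int) : Int :=
  pyInt! (PySem.Int.toStr (start_year + PySem.Int.floordiv j 4) ++ pyFmt02 (PySem.Int.mod j 4 + 1))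

-- B's recursion in closed form: the filtered codes of the flat indices 0..j, in index order
theorem pvBuild_eq (mp floor sy : Int) : ∀ (n : Nat) (j : Int), j + 1 = n →
    pvBuild mp floor sy j
      = ((PySem.List.pyRange 0 (j + 1) 1).map (pvCode sy)).filter
          (fun p => decide (floor ≤ p ∧ p ≤ mp)) := by
  intro n
  induction n with
  | zero =>
    intro j hj
    have hneg : j < 0 := by omega
    rw [pvBuild]
    simp [hneg, show j + 1 = (0 : Int) from by omega]
  | succ n ih =>
    intro j hj
    by_cases hneg : j < 0
    · -- only n = 0 can put a negative j here, and then j = -1 is impossible with j+1 = n+1 ≥ 1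
      omega
    · rw [pvBuild]
      have h0 : (0 : Int) ≤ j := by omega
      rw [PySem.List.pyRange_one_succ_right h0]
      have ihj := ih (j - 1) (by omega)
      simp only [hneg, dif_neg, not_false_iff, ihj, show j - 1 + 1 = j from by ring]
      rw [show pyInt! (PySem.Int.toStr (sy + PySem.Int.floordiv j 4) ++ pyFmt02 (PySem.Int.mod j 4 + 1))
            = pvCode sy j from rfl]
      by_cases hc : floor ≤ pvCode sy j ∧ pvCode sy j ≤ mp <;>
        simp [hc, List.filter_append]

-- inner loop of A: conditional append of g x = filter∘map
theorem pvFoldlIteAppend (g : Int → Int) (P : Int → Prop) [DecidablePred P] (l acc : List Int) :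
    l.foldl (fun a x => if P (g x) then a ++ [g x] else a) acc
      = acc ++ (l.map g).filter (fun p => decide (P p)) := by
  induction l generalizing acc with
  | nil => simp
  | cons x l ih =>
    by_cases h : P (g x) <;> simp [List.foldl, ih, h]

-- A's nested loops in closed form: the same filtered codes of the flat indices 0..23
theorem pvA_eq (Y m : Int) :
    (PySem.List.pyRange (Y - 5) (Y + 1) 1).foldl (fun periods year =>
      ([1, 2, 3, 4] : List Int).foldl (fun periods quarter =>
        if pyInt! (PySem.Int.toStr (Y - 5) ++ "02") ≤ pyInt! (PySem.Int.toStr year ++ pyFmt02 quarter) ∧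
            pyInt! (PySem.Int.toStr year ++ pyFmt02 quarter) ≤ m then
          periods ++ [pyInt! (PySem.Int.toStr year ++ pyFmt02 quarter)]
        else periods) periods) []
      = ((PySem.List.pyRange 0 24 1).map (pvCode (Y - 5))).filter
          (fun p => decide (pyInt! (PySem.Int.toStr (Y - 5) ++ "02") ≤ p ∧ p ≤ m)) := by
  have hyears : PySem.List.pyRange (Y - 5) (Y + 1) 1
      = [Y - 5, Y - 4, Y - 3, Y - 2, Y - 1, Y] := by
    rw [PySem.List.pyRange_one]
    have h6 : (Y + 1 - (Y - 5)).toNat = 6 := by omega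
    rw [h6]
    simp [List.range_succ]
    omega
  have hjs : PySem.List.pyRange 0 24 1
      = [0, 1, 2, 3, 4, 5, 6, 7, 8, 9, 10, 11, 12, 13, 14, 15, 16, 17, 18, 19, 20, 21, 22, 23] := by
    decide
  rw [hyears, hjs]
  simp only [pvFoldlIteAppend
    (P := fun p => pyInt! (PySem.Int.toStr (Y - 5) ++ "02") ≤ p ∧ p ≤ m)]
  simp only [List.foldl, List.nil_append]
  rw [← List.filter_append, ← List.filter_append, ← List.filter_append, ← List.filter_append,
    ← List.filter_append]
  congr 1
  simp only [List.map, List.cons_append, List.nil_append, pvCode]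
  norm_num [show Y - 5 + 1 = Y - 4 from by ring,
    show Y - 5 + 2 = Y - 3 from by ring,
    show Y - 5 + 3 = Y - 2 from by ring,
    show Y - 5 + 4 = Y - 1 from by ring,
    show Y - 5 + 5 = Y from by ring,
    show PySem.Int.floordiv (0:Int) 4 = 0 from by decide,
    show PySem.Int.floordiv (1:Int) 4 = 0 from by decide,
    show PySem.Int.floordiv (2:Int) 4 = 0 from by decide,
    show PySem.Int.floordiv (3:Int) 4 = 0 from by decide,
    show PySem.Int.floordiv (4:Int) 4 = 1 from by decide,
    show PySem.Int.floordiv (5:Int) 4 = 1 from by decide,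
    show PySem.Int.floordiv (6:Int) 4 = 1 from by decide,
    show PySem.Int.floordiv (7:Int) 4 = 1 from by decide,
    show PySem.Int.floordiv (8:Int) 4 = 2 from by decide,
    show PySem.Int.floordiv (9:Int) 4 = 2 from by decide,
    show PySem.Int.floordiv (10:Int) 4 = 2 from by decide,
    show PySem.Int.floordiv (11:Int) 4 = 2 from by decide,
    show PySem.Int.floordiv (12:Int) 4 = 3 from by decide,
    show PySem.Int.floordiv (13:Int) 4 = 3 from by decide,
    show PySem.Int.floordiv (14:Int) 4 = 3 from by decide,
    show PySem.Int.floordiv (15:Int) 4 = 3 from by decide,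
    show PySem.Int.floordiv (16:Int) 4 = 4 from by decide,
    show PySem.Int.floordiv (17:Int) 4 = 4 from by decide,
    show PySem.Int.floordiv (18:Int) 4 = 4 from by decide,
    show PySem.Int.floordiv (19:Int) 4 = 4 from by decide,
    show PySem.Int.floordiv (20:Int) 4 = 5 from by decide,
    show PySem.Int.floordiv (21:Int) 4 = 5 from by decide,
    show PySem.Int.floordiv (22:Int) 4 = 5 from by decide,
    show PySem.Int.floordiv (23:Int) 4 = 5 from by decide,
    show PySem.Int.mod (0:Int) 4 = 0 from by decide,
    show PySem.Int.mod (1:Int) 4 = 1 from by decide,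
    show PySem.Int.mod (2:Int) 4 = 2 from by decide,
    show PySem.Int.mod (3:Int) 4 = 3 from by decide,
    show PySem.Int.mod (4:Int) 4 = 0 from by decide,
    show PySem.Int.mod (5:Int) 4 = 1 from by decide,
    show PySem.Int.mod (6:Int) 4 = 2 from by decide,
    show PySem.Int.mod (7:Int) 4 = 3 from by decide,
    show PySem.Int.mod (8:Int) 4 = 0 from by decide,
    show PySem.Int.mod (9:Int) 4 = 1 from by decide,
    show PySem.Int.mod (10:Int) 4 = 2 from by decide,
    show PySem.Int.mod (11:Int) 4 = 3 from by decide,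
    show PySem.Int.mod (12:Int) 4 = 0 from by decide,
    show PySem.Int.mod (13:Int) 4 = 1 from by decide,
    show PySem.Int.mod (14:Int) 4 = 2 from by decide,
    show PySem.Int.mod (15:Int) 4 = 3 from by decide,
    show PySem.Int.mod (16:Int) 4 = 0 from by decide,
    show PySem.Int.mod (17:Int) 4 = 1 from by decide,
    show PySem.Int.mod (18:Int) 4 = 2 from by decide,
    show PySem.Int.mod (19:Int) 4 = 3 from by decide,
    show PySem.Int.mod (20:Int) 4 = 0 from by decide,
    show PySem.Int.mod (21:Int) 4 = 1 from by decide,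
    show PySem.Int.mod (22:Int) 4 = 2 from by decide,
    show PySem.Int.mod (23:Int) 4 = 3 from by decide]

-- ===== VERDICT (by name: the statement is the Claim_ definition above) =====
theorem generate_period_list_spec : Claim_equal_generate_period_list := by
  intro m _
  unfold Spec_generate_period_list generate_period_list generate_period_list_alt
  rw [pvBuild_eq m _ _ 24 23 (by norm_num)]
  exact pvA_eq _ m
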